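-- pv_equiv track=rewrite | github.com/kwon243/epic | make_groups.py | choose_best_plans
-- ===== SOURCE A (Python) =====
-- from typing import Dict, List, Optional, Tuple
--
-- def all_size_plans(n: int) -> List[List[int]]:
--     """
--     Return all plans (list of sizes) such that 2*a + 3*b = n.
--     """
--     plans = []
--     for b in range(n // 3 + 1):
--         rem = n - 3 * b
--         if rem < 0:
--             continue
--         if rem % 2 == 0:
--             a = rem // 2
--             plans.append([3] * b + [2] * a)
--     return plans
--
-- def plan_penalty(plan: List[int], phones: List[str], pref: Dict[str, str]) -> int:
--     """
--     Estimate mismatch penalty for a plan ignoring actual pair feasibility.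
--     Greedy assign people who prefer 3 to 3-slots etc.
--     """
--     want2 = [p for p in phones if pref.get(p, "N") == "2"]
--     want3 = [p for p in phones if pref.get(p, "N") == "3"]
--     no = [p for p in phones if pref.get(p, "N") == "N"]
--
--     slots2 = plan.count(2) * 2
--     slots3 = plan.count(3) * 3
--
--     # Put want3 into 3 slots first, want2 into 2 slots first.
--     # Penalty counts the overflow that will likely be mismatched.
--     pen = 0
--     if len(want3) > slots3:
--         pen += (len(want3) - slots3) * 2 # 2 -> mismatch penalty
--     if len(want2) > slots2:
--         pen += (len(want2) - slots2) * 2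
--
--     # Also penalize if plan has too few 3 slots given want3
--     # and too few 2 slots given want2 (already captured).
--     return pen
--
-- def count_no_pref(phones: List[str], pref: Dict[str, str]) -> int:
--     return sum(1 for p in phones if pref.get(p, "N") == "N")
--
-- def choose_best_plans(n: int, phones: List[str], pref: Dict[str, str], top_k: int = 3) -> List[List[int]]:
--     """
--     Choose size plans (2/3) for n people.
--
--     Primary objective: satisfy explicit preferences ("2"/"3") as much as possible.
--     Secondary objective: among similar preference-mismatch plans, prefer MORE 3-person groups
--     so that no-preference people are more likely to land in 3s than 2s.
--     """
--     plans = all_size_plans(n)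
--
--     want3_count = sum(1 for p in phones if pref.get(p, "N") == "3")
--     want2_count = sum(1 for p in phones if pref.get(p, "N") == "2")
--     no_pref_count = count_no_pref(phones, pref)
--
--     def sort_key(pl: List[int]):
--         ppen = plan_penalty(pl, phones, pref)
--
--         num3 = pl.count(3)
--         num2 = pl.count(2)
--
--         # If there are many no-preference people, it's especially reasonable to bias toward 3s.
--         # We'll treat "more 3s" as a tie-breaker, not a primary objective.
--         # (Lower key is better.)
--         return (
--             ppen,                        # 1) minimize preference mismatch
--             -num3,                       # 2) prefer more groups of 3
--             num2,                        # 3) prefer fewer groups of 2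
--             abs(num3 - (want3_count // 3)),  # 4) weak alignment with amount of want3
--         )
--
--     plans.sort(key=sort_key)
--     return plans[: max(1, min(top_k, len(plans)))]
-- ===== SOURCE B (Python) =====
-- from typing import Dict, List
--
-- def choose_best_plans(n: int, phones: List[str], pref: Dict[str, str], top_k: int = 3) -> List[List[int]]:
--     """
--     Bounded top-k selection instead of a full sort: one pass over the candidate
--     b-values (number of 3-groups) maintaining a small ordered buffer of the best
--     `cap` candidates; preference counts are gathered in a single pass over
--     phones; only the selected plans are materialized.  Keys are pairwise
--     distinct (the -b component), so the buffer equals the sorted prefix.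
--     """
--     want3 = 0
--     want2 = 0
--     for p in phones:
--         v = pref.get(p, "N")
--         if v == "3":
--             want3 += 1
--         elif v == "2":
--             want2 += 1
--
--     cap = top_k if top_k > 1 else 1
--     best = []  # ascending by key, at most cap entries
--     for b in range(n // 3 + 1):
--         if (n - 3 * b) % 2 != 0:
--             continue
--         a = (n - 3 * b) // 2
--         pen = 2 * max(0, want3 - 3 * b) + 2 * max(0, want2 - 2 * a)
--         key = (pen, -b, a, abs(b - want3 // 3))
--         if len(best) == cap and not key < best[-1][0]:
--             continue
--         i = 0
--         while i < len(best) and best[i][0] < key: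
--             i += 1
--         best.insert(i, (key, b))
--         if len(best) > cap:
--             best.pop()
--     return [[3] * b + [2] * ((n - 3 * b) // 2) for (_, b) in best]
-- ===== Notes on version B (the rewrite author's own statement) =====
-- stated objective: faster
-- what changed: Replaces A's build-all-plans-then-full-sort with a single-pass bounded top-k selection: preference counts are accumulated in one pass over phones, each candidate b gets an O(1) key (keys are pairwise distinct via the -b component) and is inserted into an ordered buffer capped at top_k, so no sort is performed and only the selected plans are materialized.
import Mathlib
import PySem

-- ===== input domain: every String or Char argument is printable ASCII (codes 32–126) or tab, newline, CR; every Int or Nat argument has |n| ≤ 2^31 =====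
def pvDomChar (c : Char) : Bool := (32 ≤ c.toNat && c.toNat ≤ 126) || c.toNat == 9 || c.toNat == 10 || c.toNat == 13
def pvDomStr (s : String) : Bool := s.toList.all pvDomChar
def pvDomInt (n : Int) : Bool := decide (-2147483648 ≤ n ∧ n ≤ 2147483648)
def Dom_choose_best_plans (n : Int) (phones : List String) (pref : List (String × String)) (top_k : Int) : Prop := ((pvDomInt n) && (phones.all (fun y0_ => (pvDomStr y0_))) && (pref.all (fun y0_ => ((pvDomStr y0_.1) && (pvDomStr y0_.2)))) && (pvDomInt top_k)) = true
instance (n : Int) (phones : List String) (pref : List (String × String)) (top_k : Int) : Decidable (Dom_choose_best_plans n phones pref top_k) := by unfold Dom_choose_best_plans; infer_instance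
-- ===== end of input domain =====

-- B replaces A's "materialize every plan, rescan phones per sort key, full sort, slice" by a
-- single pass over the candidate b-values keeping a bounded ordered buffer of the best top_k
-- (keys are pairwise distinct via the -b component, so the buffer is the sorted prefix);
-- preference counts are gathered in one pass over phones.

-- ===== PORT A =====
-- the 4-tuple sort key of A: a fixed-length `List Int` compares exactly like Python's int tuple
abbrev pvKey : Type := List Int

def pvAllSizePlans (n : Int) : List (List Int) :=
  (PySem.List.pyRange 0 (PySem.Int.floordiv n 3 + 1)).foldl (fun plans b =>
    let rem := n - 3 * b
    if rem < 0 then plans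
    else if PySem.Int.mod rem 2 == 0 then
      let a := PySem.Int.floordiv rem 2
      plans ++ [PySem.List.pyRepeat [3] b ++ PySem.List.pyRepeat [2] a]
    else plans) []

def pvPlanPenalty (plan : List Int) (phones : List String) (pref : PySem.Dict String String) : Int :=
  let want2 := phones.filter (fun p => pref.getD p "N" == "2")
  let want3 := phones.filter (fun p => pref.getD p "N" == "3")
  let _no := phones.filter (fun p => pref.getD p "N" == "N")
  let slots2 : Int := (PySem.List.count plan 2 : Int) * 2
  let slots3 : Int := (PySem.List.count plan 3 : Int) * 3
  let pen : Int := 0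
  let pen := if (want3.length : Int) > slots3 then pen + ((want3.length : Int) - slots3) * 2 else pen
  let pen := if (want2.length : Int) > slots2 then pen + ((want2.length : Int) - slots2) * 2 else pen
  pen

def pvCountNoPref (phones : List String) (pref : PySem.Dict String String) : Int :=
  (phones.map (fun p => if pref.getD p "N" == "N" then (1 : Int) else 0)).sum

def pvSortKey (phones : List String) (pref : PySem.Dict String String) (want3_count : Int) (pl : List Int) : pvKey :=
  let ppen := pvPlanPenalty pl phones pref
  let num3 : Int := (PySem.List.count pl 3 : Int)
  let num2 : Int := (PySem.List.count pl 2 : Int)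
  [ppen, -num3, num2, |num3 - PySem.Int.floordiv want3_count 3|]

def choose_best_plans (n : Int) (phones : List String) (pref : List (String × String)) (top_k : Int) : List (List Int) :=
  let prefd := PySem.Dict.ofList pref
  let plans := pvAllSizePlans n
  let want3_count : Int := (phones.map (fun p => if prefd.getD p "N" == "3" then (1 : Int) else 0)).sum
  let _want2_count : Int := (phones.map (fun p => if prefd.getD p "N" == "2" then (1 : Int) else 0)).sum
  let _no_pref_count := pvCountNoPref phones prefd
  -- plans.sort(key=sort_key): CPython computes the key once per element
  -- (decorate–sort–undecorate); ported the same way, stable sort on the key component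
  let sortedPlans := (PySem.List.sorted
      (plans.map (fun pl => (pvSortKey phones prefd want3_count pl, pl)))
      (fun d => d.1)).map (fun d => d.2)
  PySem.List.slice sortedPlans none (some (max 1 (min top_k (sortedPlans.length : Int))))

-- ===== PORT B =====
-- the `key = (pen, -b, a, abs(b - want3 // 3))` line of Source B (a and pen are its two preceding lines)
def pvAltKey (n want3 want2 b : Int) : pvKey :=
  let a := PySem.Int.floordiv (n - 3 * b) 2
  let pen := 2 * max 0 (want3 - 3 * b) + 2 * max 0 (want2 - 2 * a)
  [pen, -b, a, |b - PySem.Int.floordiv want3 3|]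

-- '[3] * b + [2] * ((n - 3 * b) // 2)'
def pvPlanOf (n : Int) (b : Int) : List Int :=
  PySem.List.pyRepeat [3] b ++ PySem.List.pyRepeat [2] (PySem.Int.floordiv (n - 3 * b) 2)

-- the linear-scan insertion 'i = 0; while i < len(best) and best[i][0] < key: i += 1; best.insert(i, ...)'
def pvInsLB (x : pvKey × Int) : List (pvKey × Int) → List (pvKey × Int)
  | [] => [x]
  | y :: t => if y.1 < x.1 then y :: pvInsLB x t else x :: y :: t

-- one loop body: skip test ('len(best) == cap and not key < best[-1][0]', total ≥ on int
-- 4-tuples is ¬<; best[-1] exists there since cap ≥ 1), insert, pop if over cap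
def pvCapIns (cap : Int) (best : List (pvKey × Int)) (x : pvKey × Int) : List (pvKey × Int) :=
  let skip := match best.getLast? with
    | some last => ((best.length : Int) == cap) && !(decide (x.1 < last.1))
    | none => false
  if skip then best
  else
    let best' := pvInsLB x best
    if (best'.length : Int) > cap then best'.dropLast else best'

def choose_best_plans_alt (n : Int) (phones : List String) (pref : List (String × String)) (top_k : Int) : List (List Int) :=
  let prefd := PySem.Dict.ofList pref
  -- one pass over phones: (want3, want2)
  let wc := phones.foldl (fun (wc : Int × Int) p =>
      let v := prefd.getD p "N"
      if v == "3" then (wc.1 + 1, wc.2)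
      else if v == "2" then (wc.1, wc.2 + 1)
      else wc) (0, 0)
  let cap : Int := if top_k > 1 then top_k else 1
  let best := (PySem.List.pyRange 0 (PySem.Int.floordiv n 3 + 1)).foldl
      (fun best b =>
        if PySem.Int.mod (n - 3 * b) 2 ≠ 0 then best
        else pvCapIns cap best (pvAltKey n wc.1 wc.2 b, b)) []
  best.map (fun d => pvPlanOf n d.2)

-- ===== PRECONDITION & SPEC =====
def Spec_choose_best_plans (n : Int) (phones : List String) (pref : List (String × String)) (top_k : Int) (out : List (List Int)) : Prop := out = choose_best_plans_alt n phones pref top_k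
instance (n : Int) (phones : List String) (pref : List (String × String)) (top_k : Int) (out : List (List Int)) : Decidable (Spec_choose_best_plans n phones pref top_k out) := by unfold Spec_choose_best_plans; infer_instance

-- ===== CLAIM (what is proved, stated in full; the proofs are below) =====
def Claim_equal_choose_best_plans : Prop := ∀ (n : Int) (phones : List String) (pref : List (String × String)) (top_k : Int), Dom_choose_best_plans n phones pref top_k → Spec_choose_best_plans n phones pref top_k (choose_best_plans n phones pref top_k)

-- ===== LEMMAS AND PROOFS =====

-- the candidate list of A is exactly the filtered b-range, each mapped to its plan
lemma pv_allSizePlans_eq (n : Int) :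
    pvAllSizePlans n =
      ((PySem.List.pyRange 0 (PySem.Int.floordiv n 3 + 1)).filter
          (fun b => PySem.Int.mod (n - 3 * b) 2 == 0)).map (pvPlanOf n) := by
  unfold pvAllSizePlans
  rw [PySem.List.foldl_congr_mem _ _
        (fun plans b => if PySem.Int.mod (n - 3 * b) 2 == 0 then plans ++ [pvPlanOf n b] else plans)
        [] ?hcong]
  case hcong =>
    intro acc b hbmem
    have hr := PySem.List.mem_pyRange_one.1 hbmem
    have h3 : b * 3 ≤ n :=
      (PySem.Int.le_floordiv_iff_mul_le (by norm_num : (0:Int) < 3)).1 (by omega)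
    simp only [pvPlanOf]
    rw [if_neg (by omega)]
  rw [PySem.List.foldl_append_if]
  simp

-- insertBy commutes with map when the predicate is the mapped one
lemma pv_insertBy_map {α β : Type} (f : α → β) (before : β → β → Bool) (x : α) (ys : List α) :
    PySem.List.insertBy before (f x) (ys.map f)
      = (PySem.List.insertBy (fun a b => before (f a) (f b)) x ys).map f := by
  induction ys with
  | nil => rfl
  | cons y t ih =>
      simp only [List.map_cons, PySem.List.insertBy]
      by_cases h : before (f x) (f y) = true
      · simp [h]
      · simp [h, ih]

-- sorting a mapped list = mapping the list sorted by the composed key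
lemma pv_sorted_map {α β κ : Type} [LT κ] [DecidableLT κ] (f : α → β) (key : β → κ) (l : List α) :
    PySem.List.sorted (l.map f) key = (PySem.List.sorted l (fun a => key (f a))).map f := by
  rw [PySem.List.sorted_eq_foldl_insertBy, PySem.List.sorted_eq_foldl_insertBy]
  have h : ∀ (acc : List α),
      (l.map f).foldl (fun acc x => PySem.List.insertBy (fun a b => decide (key a < key b)) x acc) (acc.map f)
        = (l.foldl (fun acc x => PySem.List.insertBy (fun a b => decide (key (f a) < key (f b))) x acc) acc).map f := by
    induction l with
    | nil => intro acc; rfl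
    | cons x t ih =>
        intro acc
        simp only [List.map_cons, List.foldl_cons]
        rw [pv_insertBy_map f (fun a b => decide (key a < key b)) x acc]
        exact ih _
  simpa using h []

-- decorate–sort–undecorate by the key component is the sort by that key
lemma pv_sorted_decorate {α κ : Type} [LT κ] [DecidableLT κ] (l : List α) (k : α → κ) :
    (PySem.List.sorted (l.map (fun x => (k x, x))) (fun d => d.1)).map (fun d => d.2)
      = PySem.List.sorted l k := by
  rw [pv_sorted_map (fun x => (k x, x)) (fun d => d.1) l]
  rw [List.map_map]
  show List.map (fun x => x) (PySem.List.sorted l k) = PySem.List.sorted l k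
  simp

-- insertBy only looks at the predicate on the inserted element vs the list elements
lemma pv_insertBy_congr {α : Type} (b1 b2 : α → α → Bool) (x : α) (ys : List α)
    (h : ∀ y ∈ ys, b1 x y = b2 x y) :
    PySem.List.insertBy b1 x ys = PySem.List.insertBy b2 x ys := by
  induction ys with
  | nil => rfl
  | cons y t ih =>
      simp only [PySem.List.insertBy]
      rw [h y (by simp)]
      by_cases hb : b2 x y = true
      · simp [hb]
      · simp [hb, ih (fun z hz => h z (by simp [hz]))]

-- sorting with two keys that agree on the list's elements gives the same list
lemma pv_sorted_congr_mem {α κ : Type} [LT κ] [DecidableLT κ] (l : List α) (k1 k2 : α → κ)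
    (h : ∀ x ∈ l, k1 x = k2 x) :
    PySem.List.sorted l k1 = PySem.List.sorted l k2 := by
  rw [PySem.List.sorted_eq_foldl_insertBy, PySem.List.sorted_eq_foldl_insertBy]
  have main : ∀ (acc : List α), (∀ y ∈ acc, k1 y = k2 y) →
      l.foldl (fun acc x => PySem.List.insertBy (fun a b => decide (k1 a < k1 b)) x acc) acc
        = l.foldl (fun acc x => PySem.List.insertBy (fun a b => decide (k2 a < k2 b)) x acc) acc := by
    induction l with
    | nil => intro acc _; rfl
    | cons x t ih =>
        intro acc hacc
        simp only [List.foldl_cons]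
        have hx : k1 x = k2 x := h x (by simp)
        have hins : PySem.List.insertBy (fun a b => decide (k1 a < k1 b)) x acc
            = PySem.List.insertBy (fun a b => decide (k2 a < k2 b)) x acc := by
          apply pv_insertBy_congr
          intro y hy
          rw [hx, hacc y hy]
        rw [hins]
        apply ih (fun z hz => h z (by simp [hz]))
        intro y hy
        rcases (PySem.List.mem_insertBy _ x y acc).1 hy with h1 | h2
        · subst h1; exact hx
        · exact hacc y h2
  exact main [] (by simp)

-- occurrence counts in a materialized plan
lemma pv_count_planOf (n b : Int) (hb : 0 ≤ b) (hrem : 0 ≤ n - 3 * b) :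
    (PySem.List.count (pvPlanOf n b) 3 : Int) = b ∧
      (PySem.List.count (pvPlanOf n b) 2 : Int) = PySem.Int.floordiv (n - 3 * b) 2 := by
  have ha : 0 ≤ PySem.Int.floordiv (n - 3 * b) 2 := by
    rw [PySem.Int.floordiv_eq_ediv_of_pos (by norm_num : (0:Int) < 2)]
    exact Int.ediv_nonneg hrem (by norm_num)
  unfold pvPlanOf
  rw [PySem.List.pyRepeat_singleton, PySem.List.pyRepeat_singleton]
  constructor
  · simp [PySem.List.count, List.count_append, List.count_replicate]
    omega
  · simp [PySem.List.count, List.count_append, List.count_replicate]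
    omega

-- on the filtered range, A's key of the materialized plan is B's key of b
lemma pv_key_eq (n : Int) (phones : List String) (prefd : PySem.Dict String String) (b : Int)
    (hb : 0 ≤ b) (hble : b ≤ PySem.Int.floordiv n 3) :
    pvSortKey phones prefd
        ((phones.map (fun p => if prefd.getD p "N" == "3" then (1 : Int) else 0)).sum)
        (pvPlanOf n b)
      = pvAltKey n ((phones.filter (fun p => prefd.getD p "N" == "3")).length : Int)
          ((phones.filter (fun p => prefd.getD p "N" == "2")).length : Int) b := by
  have hrem : 0 ≤ n - 3 * b := by
    have := (PySem.Int.le_floordiv_iff_mul_le (by norm_num : (0:Int) < 3)).1 hble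
    omega
  obtain ⟨h3, h2⟩ := pv_count_planOf n b hb hrem
  have hw3 : (phones.map (fun p => if prefd.getD p "N" == "3" then (1 : Int) else 0)).sum
      = ((phones.filter (fun p => prefd.getD p "N" == "3")).length : Int) := by
    rw [PySem.List.sum_map_ite_one_zero]
    simp [List.countP_eq_length_filter]
  unfold pvSortKey pvAltKey pvPlanPenalty
  simp only [h3, h2, hw3, List.cons.injEq]
  refine ⟨?_, trivial⟩
  split_ifs <;> omega

-- B's single counting pass over phones computes the two filter lengths
lemma pv_counts (phones : List String) (prefd : PySem.Dict String String) :
    ∀ (c3 c2 : Int), phones.foldl (fun (wc : Int × Int) p =>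
        let v := prefd.getD p "N"
        if v == "3" then (wc.1 + 1, wc.2)
        else if v == "2" then (wc.1, wc.2 + 1)
        else wc) (c3, c2)
      = (c3 + ((phones.filter (fun p => prefd.getD p "N" == "3")).length : Int),
         c2 + ((phones.filter (fun p => prefd.getD p "N" == "2")).length : Int)) := by
  induction phones with
  | nil => intro c3 c2; simp
  | cons p t ih =>
      intro c3 c2
      simp only [List.foldl_cons, List.filter_cons]
      by_cases h3 : prefd.getD p "N" == "3"
      · have h2 : (prefd.getD p "N" == "2") = false := by
          simp only [beq_iff_eq] at h3 ⊢; simp [h3]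
        simp only [h3, h2, if_true, if_false, Bool.false_eq_true]
        rw [ih]
        simp; ring
      · by_cases h2 : prefd.getD p "N" == "2"
        · simp only [h3, h2, Bool.false_eq_true, if_false, if_true]
          rw [ih]
          simp; ring
        · simp only [h3, h2, Bool.false_eq_true, if_false]
          rw [ih]

-- slicing commutes with map
lemma pv_slice_map {α β : Type} (f : α → β) (l : List α) (k : Int) :
    PySem.List.slice (l.map f) none (some k) = (PySem.List.slice l none (some k)).map f := by
  simp [PySem.List.slice, List.map_take]

lemma pv_insLB_ne_nil (x : pvKey × Int) (s : List (pvKey × Int)) : pvInsLB x s ≠ [] := by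
  cases s with
  | nil => simp [pvInsLB]
  | cons y t => simp only [pvInsLB]; split <;> simp

-- inserting an element with a fresh key keeps the buffer strictly key-sorted
lemma pv_insertBy_pairwise_lt (x : pvKey × Int) (s : List (pvKey × Int))
    (hs : s.Pairwise (fun p q => p.1 < q.1)) (hx : ∀ y ∈ s, x.1 ≠ y.1) :
    (PySem.List.insertBy (fun a b : pvKey × Int => decide (a.1 < b.1)) x s).Pairwise
      (fun p q => p.1 < q.1) := by
  induction s with
  | nil => simp [PySem.List.insertBy]
  | cons y t ih =>
      rcases List.pairwise_cons.1 hs with ⟨hy, ht⟩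
      simp only [PySem.List.insertBy]
      by_cases hxy : x.1 < y.1
      · simp only [decide_eq_true_eq, hxy, if_true]
        refine List.pairwise_cons.2 ⟨?_, hs⟩
        intro z hz
        rcases List.mem_cons.1 hz with rfl | hz
        · exact hxy
        · exact lt_trans hxy (hy z hz)
      · have hne : x.1 ≠ y.1 := hx y (by simp)
        have hyx : y.1 < x.1 := by
          rcases lt_trichotomy x.1 y.1 with h | h | h
          · exact absurd h hxy
          · exact absurd h hne
          · exact h
        simp only [decide_eq_true_eq, hxy, if_false]
        refine List.pairwise_cons.2 ⟨?_, ih ht (fun z hz => hx z (by simp [hz]))⟩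
        intro z hz
        rcases (PySem.List.mem_insertBy _ x z t).1 hz with rfl | hz
        · exact hyx
        · exact hy z hz

-- peeling a strictly smaller head off the buffer lowers the cap by one
lemma pv_capIns_cons (cap : Int) (hcap : 2 ≤ cap) (x y : pvKey × Int)
    (u : List (pvKey × Int)) (hyx : y.1 < x.1) :
    pvCapIns cap (y :: u) x = y :: pvCapIns (cap - 1) u x := by
  have hnotlt : ¬ x.1 < y.1 := lt_asymm hyx
  cases u with
  | nil =>
      simp only [pvCapIns, List.getLast?_singleton, List.getLast?_nil, pvInsLB, hyx, if_pos]
      simp only [List.length_cons, List.length_nil]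
      simp [hnotlt]
      have hc2 : ¬(cap ≤ 1) := by omega
      rw [if_neg (by omega : ¬(1:Int) = cap), if_neg hc2, if_neg hc2]
  | cons z t =>
      have hlast : (y :: z :: t).getLast? = (z :: t).getLast? := by
        simp [List.getLast?_cons_cons]
      obtain ⟨w, hw⟩ : ∃ w, (z :: t).getLast? = some w :=
        ⟨_, List.getLast?_eq_some_iff.2 ⟨(z::t).dropLast, (List.dropLast_concat_getLast (by simp)).symm⟩⟩
      have hins : pvInsLB x (y :: z :: t) = y :: pvInsLB x (z :: t) := by
        simp [pvInsLB, hyx]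
      have hlen : (((y :: z :: t).length : Int) == cap) = (((z :: t).length : Int) == (cap - 1)) := by
        rw [Bool.eq_iff_iff]
        simp only [beq_iff_eq, List.length_cons]
        push_cast
        omega
      simp only [pvCapIns, hlast, hw, hlen, hins]
      by_cases hskip : ((((z :: t).length : Int) == cap - 1) && !decide (x.1 < w.1)) = true
      · rw [if_pos hskip, if_pos hskip]
      · rw [if_neg hskip, if_neg hskip]
        by_cases hgt : ((pvInsLB x (z :: t)).length : Int) > cap - 1
        · rw [if_pos (by simp only [List.length_cons]; push_cast; omega), if_pos hgt,
             List.dropLast_cons_of_ne_nil (pv_insLB_ne_nil x (z :: t))]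
        · rw [if_neg (by simp only [List.length_cons]; push_cast; omega), if_neg hgt]

-- one capped insertion into the cap-prefix of a strictly sorted list
-- = cap-prefix of the full sorted insertion
lemma pv_capIns_step (cap : Int) (hcap : 1 ≤ cap) (x : pvKey × Int) (s : List (pvKey × Int))
    (hs : s.Pairwise (fun p q => p.1 < q.1)) (hx : ∀ y ∈ s, x.1 ≠ y.1) :
    pvCapIns cap (s.take cap.toNat) x
      = (PySem.List.insertBy (fun a b : pvKey × Int => decide (a.1 < b.1)) x s).take cap.toNat := by
  induction s generalizing cap with
  | nil =>
      simp only [List.take_nil, pvCapIns, List.getLast?_nil, pvInsLB, PySem.List.insertBy]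
      rw [if_neg (by simp)]
      simp only [List.length_cons, List.length_nil]
      rw [if_neg (by push_cast; omega)]
      rw [List.take_of_length_le (by simp; omega)]
  | cons y t ih =>
      rcases List.pairwise_cons.1 hs with ⟨hy, ht⟩
      obtain ⟨c, hc⟩ : ∃ c, cap.toNat = c + 1 := ⟨cap.toNat - 1, by omega⟩
      by_cases hxy : x.1 < y.1
      · have hrhs : PySem.List.insertBy (fun a b : pvKey × Int => decide (a.1 < b.1)) x (y :: t)
            = x :: y :: t := by simp [PySem.List.insertBy, hxy]
        rw [hrhs, hc, List.take_succ_cons]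
        -- skip condition is false: the buffer's last element has key > x.1
        obtain ⟨z, hz⟩ : ∃ z, (y :: t.take c).getLast? = some z :=
          ⟨_, List.getLast?_eq_some_iff.2 ⟨_, (List.dropLast_concat_getLast (by simp)).symm⟩⟩
        have hzmem : z ∈ y :: t.take c := List.mem_of_getLast? hz
        have hxz : x.1 < z.1 := by
          rcases List.mem_cons.1 hzmem with rfl | hzt
          · exact hxy
          · exact lt_trans hxy (hy z (List.take_subset c t hzt))
        have hins : pvInsLB x (y :: t.take c) = x :: y :: t.take c := by
          simp [pvInsLB, lt_asymm hxy]
        simp only [pvCapIns, hz, hins]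
        rw [if_neg (by simp [hxz])]
        by_cases hlen : c ≤ t.length
        · have hltk : (t.take c).length = c := by simp [List.length_take]; omega
          rw [if_pos (by simp only [List.length_cons, hltk]; push_cast; omega)]
          -- dropLast of the (c+2)-long list x :: y :: t.take c
          rw [List.take_succ_cons]
          rcases Nat.eq_zero_or_pos c with rfl | hcpos
          · simp
          · obtain ⟨c2, rfl⟩ : ∃ c2, c = c2 + 1 := ⟨c - 1, by omega⟩
            have hdl : (x :: y :: t.take (c2+1)).dropLast = x :: y :: (t.take (c2+1)).dropLast := by
              rw [List.dropLast_cons_of_ne_nil (by simp),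
                List.dropLast_cons_of_ne_nil (List.ne_nil_of_length_pos (by rw [hltk]; omega))]
            rw [hdl, List.dropLast_eq_take, hltk, List.take_take, List.take_succ_cons,
              Nat.add_sub_cancel, Nat.min_eq_left (Nat.le_succ c2)]
        · have hcapc : cap = (c : Int) + 1 := by omega
          have htt : t.take c = t := List.take_of_length_le (by omega)
          rw [htt]
          have hnogt : ¬ ((((x :: y :: t).length : Nat) : Int) > cap) := by simp; omega
          rw [if_neg hnogt]
          rw [List.take_succ_cons, List.take_of_length_le (by simp; omega)]
      · have hyx : y.1 < x.1 := by
          have hne := hx y (by simp)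
          rcases lt_trichotomy x.1 y.1 with h | h | h
          · exact absurd h hxy
          · exact absurd h hne
          · exact h
        have hrhs : PySem.List.insertBy (fun a b : pvKey × Int => decide (a.1 < b.1)) x (y :: t)
            = y :: PySem.List.insertBy (fun a b : pvKey × Int => decide (a.1 < b.1)) x t := by
          simp [PySem.List.insertBy, hxy]
        rw [hrhs, hc, List.take_succ_cons, List.take_succ_cons]
        by_cases hcap1 : cap = 1
        · subst hcap1
          have hc0 : c = 0 := by omega
          subst hc0
          simp only [List.take_zero, pvCapIns, List.getLast?_singleton]
          rw [if_pos (by simp [lt_asymm hyx])]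
        · have hcap2 : 2 ≤ cap := by omega
          have hct : c = (cap - 1).toNat := by omega
          rw [hct, pv_capIns_cons cap hcap2 x y _ hyx,
            ih (cap - 1) (by omega) ht (fun z hz => hx z (by simp [hz]))]

-- the whole capped-insertion pass = cap-prefix of the insertion sort
lemma pv_capfold_aux (cap : Int) (hcap : 1 ≤ cap) :
    ∀ (l s : List (pvKey × Int)), l.Pairwise (fun p q => p.1 ≠ q.1) →
      (∀ x ∈ l, ∀ y ∈ s, x.1 ≠ y.1) →
      s.Pairwise (fun p q => p.1 < q.1) →
      l.foldl (pvCapIns cap) (s.take cap.toNat)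
        = (l.foldl (fun acc x => PySem.List.insertBy (fun a b : pvKey × Int => decide (a.1 < b.1)) x acc) s).take cap.toNat := by
  intro l
  induction l with
  | nil => intro s _ _ _; rfl
  | cons x t ih =>
      intro s hd hds hs
      rcases List.pairwise_cons.1 hd with ⟨hxt, htd⟩
      simp only [List.foldl_cons]
      rw [pv_capIns_step cap hcap x s hs (fun y hy => hds x (by simp) y hy)]
      apply ih _ htd ?hfresh (pv_insertBy_pairwise_lt x s hs (fun y hy => hds x (by simp) y hy))
      intro z hz y hy
      rcases (PySem.List.mem_insertBy _ x y s).1 hy with rfl | hy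
      · exact (hxt z hz).symm
      · exact hds z (by simp [hz]) y hy

-- the whole capped-insertion pass = cap-prefix of the insertion sort
lemma pv_capfold (cap : Int) (hcap : 1 ≤ cap) (l : List (pvKey × Int))
    (hd : l.Pairwise (fun p q => p.1 ≠ q.1)) :
    l.foldl (pvCapIns cap) [] = (PySem.List.sorted l (fun d => d.1)).take cap.toNat := by
  rw [PySem.List.sorted_eq_foldl_insertBy]
  have := pv_capfold_aux cap hcap l [] hd (by simp) (by simp)
  simpa using this

-- candidate keys are pairwise distinct (the -b component)
lemma pv_cands_pairwise (n w3 w2 : Int) (bs : List Int) (hnd : bs.Nodup) :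
    (bs.map (fun b => (pvAltKey n w3 w2 b, b))).Pairwise
      (fun p q : pvKey × Int => p.1 ≠ q.1) := by
  rw [List.pairwise_map]
  refine hnd.imp ?_
  intro a b hab
  simp only [ne_eq, pvAltKey, List.cons.injEq]
  intro h
  exact hab (by omega)

-- A's slice bound and B's cap take the same prefix
lemma pv_take_eq {α : Type} (s : List α) (top_k : Int) :
    s.take ((max 1 (min top_k (s.length : Int))).toNat)
      = s.take ((if top_k > 1 then top_k else 1).toNat) := by
  rw [List.take_eq_take_iff]
  split <;> omega

-- ===== VERDICT (by name: the statement is the Claim_ definition above) =====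
theorem choose_best_plans_spec : Claim_equal_choose_best_plans := by
  intro n phones pref top_k _
  unfold Spec_choose_best_plans choose_best_plans choose_best_plans_alt
  simp only []
  rw [pv_allSizePlans_eq n]
  rw [pv_sorted_decorate, pv_sorted_map]
  rw [pv_sorted_congr_mem _ _
        (pvAltKey n ((phones.filter (fun p => (PySem.Dict.ofList pref).getD p "N" == "3")).length : Int)
          ((phones.filter (fun p => (PySem.Dict.ofList pref).getD p "N" == "2")).length : Int)) ?hkeys]
  case hkeys =>
    intro b hbmem
    have hmem := (List.mem_filter.1 hbmem).1
    have hrange := PySem.List.mem_pyRange_one.1 hmem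
    exact pv_key_eq n phones _ b hrange.1 (by omega)
  rw [pv_slice_map]
  -- B side: single counting pass = the two filter lengths
  rw [pv_counts phones (PySem.Dict.ofList pref) 0 0]
  simp only [zero_add]
  -- B side: the guarded loop over the range is the loop over the filtered range
  rw [show (fun (best : List (pvKey × Int)) b =>
        if PySem.Int.mod (n - 3 * b) 2 ≠ 0 then best
        else pvCapIns (if top_k > 1 then top_k else 1) best
          (pvAltKey n ((phones.filter (fun p => (PySem.Dict.ofList pref).getD p "N" == "3")).length : Int)
            ((phones.filter (fun p => (PySem.Dict.ofList pref).getD p "N" == "2")).length : Int) b, b))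
      = (fun (best : List (pvKey × Int)) b =>
        if (PySem.Int.mod (n - 3 * b) 2 == 0) = true then pvCapIns (if top_k > 1 then top_k else 1) best
          (pvAltKey n ((phones.filter (fun p => (PySem.Dict.ofList pref).getD p "N" == "3")).length : Int)
            ((phones.filter (fun p => (PySem.Dict.ofList pref).getD p "N" == "2")).length : Int) b, b) else best)
      from by
        funext best b
        by_cases h : PySem.Int.mod (n - 3 * b) 2 = 0
        · rw [if_neg (c := PySem.Int.mod (n - 3 * b) 2 ≠ 0) (fun hne => hne h),
            if_pos (c := (PySem.Int.mod (n - 3 * b) 2 == 0) = true) (by rw [h]; rfl)]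
        · rw [if_pos (c := PySem.Int.mod (n - 3 * b) 2 ≠ 0) h,
            if_neg (c := (PySem.Int.mod (n - 3 * b) 2 == 0) = true) (by simpa using h)]]
  rw [← List.foldl_filter]
  rw [← List.foldl_map (f := fun b =>
        (pvAltKey n ((phones.filter (fun p => (PySem.Dict.ofList pref).getD p "N" == "3")).length : Int)
          ((phones.filter (fun p => (PySem.Dict.ofList pref).getD p "N" == "2")).length : Int) b, b))
        (g := pvCapIns (if top_k > 1 then top_k else 1))]
  rw [pv_capfold _ (by split <;> omega) _
        (pv_cands_pairwise _ _ _ _ ((PySem.List.nodup_pyRange_one _ _).filter _))]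
  rw [pv_sorted_map]
  rw [← List.map_take, List.map_map]
  -- both sides are a take of the same sorted list, mapped to plans
  rw [PySem.List.slice_to _ (le_trans (by norm_num) (le_max_left 1 _))]
  simp only [Function.comp_def, List.length_map]
  rw [pv_take_eq]
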